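-- pv_equiv track=rewrite | github.com/lebrqksd-bot/lebrqapp | backend/fix_quotes_proper.py | escape_unescaped_quotes
-- ===== SOURCE A (Python) =====
-- def escape_unescaped_quotes(text):
--     """Double any single quotes that aren't already doubled"""
--     result = []
--     i = 0
--
--     while i < len(text):
--         if text[i] == "'":
--             # Found a quote
--             # Check if it's already part of an escaped pair
--             if i > 0 and text[i-1] == "'":
--                 # This is the second quote in a '' pair, already counted
--                 result.append("'")
--                 i += 1
--             elif i + 1 < len(text) and text[i + 1] == "'":
--                 # This quote is followed by another - it's an escaped pair
--                 result.append("''")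
--                 i += 2
--             else:
--                 # This is an unescaped quote
--                 # We need to double it ONLY if we're inside a string literal
--                 # Check if we're inside VALUES(...) section
--                 # For now, double it if it looks like it's in data context
--                 result.append("''")
--                 i += 1
--         else:
--             result.append(text[i])
--             i += 1
--
--     return ''.join(result)
-- ===== SOURCE B (Python) =====
-- from itertools import groupby
--
-- def escape_unescaped_quotes(text):
--     """Double any single quotes that aren't already doubled"""
--     pieces = []
--     for ch, grp in groupby(text):
--         n = sum(1 for _ in grp)
--         if ch == "'" and n == 1:
--             pieces.append("''")
--         else:
--             pieces.append(ch * n)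
--     return ''.join(pieces)
-- ===== Notes on version B (the rewrite author's own statement) =====
-- stated objective: alternative
-- what changed: B walks maximal runs of identical characters via itertools.groupby and emits each run at once (doubling only a lone quote run), instead of A's index-based scan with lookback/lookahead branches.
import Mathlib
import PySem

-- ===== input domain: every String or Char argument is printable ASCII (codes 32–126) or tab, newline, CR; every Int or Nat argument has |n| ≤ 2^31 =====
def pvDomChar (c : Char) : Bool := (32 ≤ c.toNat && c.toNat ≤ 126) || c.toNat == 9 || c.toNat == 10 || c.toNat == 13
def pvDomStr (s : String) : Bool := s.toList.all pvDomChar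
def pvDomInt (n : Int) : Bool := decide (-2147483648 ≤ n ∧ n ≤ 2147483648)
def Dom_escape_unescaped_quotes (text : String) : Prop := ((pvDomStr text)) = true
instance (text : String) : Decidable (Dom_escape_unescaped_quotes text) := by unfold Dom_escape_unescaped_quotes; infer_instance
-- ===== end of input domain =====

-- B walks maximal runs of identical characters and emits each run at once (a lone quote
-- run becomes "''"), instead of A's index-based scan with lookback/lookahead branches.

-- ===== PORT A =====
-- A's while loop over index i, with its three quote branches in source order.
def aLoop (cs : List Char) (i : Nat) : List String :=
  if _h : i < cs.length then
    if cs.getD i ' ' = '\'' then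
      if 0 < i ∧ cs.getD (i - 1) ' ' = '\'' then
        "'" :: aLoop cs (i + 1)
      else if i + 1 < cs.length ∧ cs.getD (i + 1) ' ' = '\'' then
        "''" :: aLoop cs (i + 2)
      else
        "''" :: aLoop cs (i + 1)
    else
      String.singleton (cs.getD i ' ') :: aLoop cs (i + 1)
  else []
termination_by cs.length - i

def escape_unescaped_quotes (text : String) : String :=
  String.join (aLoop text.toList 0)

-- ===== PORT B =====
-- groupby: split off the maximal run of the head character, recurse on the remainder.
def bRuns (cs : List Char) : List (Char × Nat) :=
  match cs with
  | [] => []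
  | c :: rest =>
    (c, (rest.takeWhile (· = c)).length + 1) :: bRuns (rest.dropWhile (· = c))
termination_by cs.length
decreasing_by
  simp only [List.length_cons]
  exact Nat.lt_succ_of_le (List.length_dropWhile_le _ _)

def bPiece (p : Char × Nat) : String :=
  if p.1 = '\'' ∧ p.2 = 1 then "''" else String.ofList (List.replicate p.2 p.1)

def escape_unescaped_quotes_alt (text : String) : String :=
  String.join ((bRuns text.toList).map bPiece)

-- ===== PRECONDITION & SPEC =====
def Spec_escape_unescaped_quotes (text : String) (out : String) : Prop := out = escape_unescaped_quotes_alt text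
instance (text : String) (out : String) : Decidable (Spec_escape_unescaped_quotes text out) := by unfold Spec_escape_unescaped_quotes; infer_instance

-- ===== CLAIM (what is proved, stated in full; the proofs are below) =====
def Claim_equal_escape_unescaped_quotes : Prop := ∀ (text : String), Dom_escape_unescaped_quotes text → Spec_escape_unescaped_quotes text (escape_unescaped_quotes text)

-- ===== LEMMAS AND PROOFS =====

-- A list-shaped view of A's scan; the Bool records whether the previous character was a quote.
def gh (b : Bool) (l : List Char) : List String :=
  match l with
  | [] => []
  | c :: rest =>
    if c = '\'' then
      if b then "'" :: gh true rest
      else if rest.head? = some '\'' then "''" :: gh true rest.tail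
      else "''" :: gh true rest
    else String.singleton c :: gh false rest
termination_by l.length
decreasing_by
  all_goals simp only [List.length_cons, List.length_tail]
  all_goals omega

lemma gh_of_head_ne (b : Bool) (l : List Char) (h : l.head? ≠ some '\'') :
    gh b l = gh false l := by
  cases l with
  | nil => simp [gh]
  | cons c rest =>
    have hc : c ≠ '\'' := by simpa using h
    simp [gh, hc]

lemma aLoop_eq_gh (n : Nat) (cs : List Char) (i : Nat) (hn : cs.length - i ≤ n) :
    aLoop cs i = gh (decide (0 < i ∧ cs.getD (i - 1) ' ' = '\'')) (cs.drop i) := by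
  induction n generalizing i with
  | zero =>
    have h' : ¬ i < cs.length := by omega
    rw [aLoop, List.drop_eq_nil_of_le (by omega)]
    simp [h', gh]
  | succ n ih =>
    by_cases h : i < cs.length
    · have hdrop : cs.drop i = cs.getD i ' ' :: cs.drop (i + 1) := by
        rw [List.getD_eq_getElem _ _ h, List.drop_eq_getElem_cons h]
      rw [aLoop, hdrop]
      simp only [h, dif_pos]
      by_cases hq : cs.getD i ' ' = '\''
      · by_cases hb : 0 < i ∧ cs.getD (i - 1) ' ' = '\''
        · -- branch 1: previous char is a quote
          rw [if_pos hq, if_pos hb]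
          simp only [gh, hq, if_pos, hb, and_self, decide_true, if_true]
          rw [ih (i + 1) (by omega)]
          have hc : (0 < i + 1 ∧ cs.getD (i + 1 - 1) ' ' = '\'') := ⟨Nat.succ_pos _, by simpa using hq⟩
          rw [decide_eq_true hc]
        · by_cases hn2 : i + 1 < cs.length ∧ cs.getD (i + 1) ' ' = '\''
          · -- branch 2: next char is a quote, consume two
            rw [if_pos hq, if_neg hb, if_pos hn2]
            have hdrop2 : cs.drop (i + 1) = cs.getD (i + 1) ' ' :: cs.drop (i + 2) := by
              rw [List.getD_eq_getElem _ _ hn2.1, List.drop_eq_getElem_cons hn2.1]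
            simp only [gh, hq, if_pos, hb, decide_false, Bool.false_eq_true, if_false,
              hdrop2, hn2.2, List.head?_cons, List.tail_cons, if_true]
            rw [ih (i + 2) (by omega)]
            have hc : (0 < i + 2 ∧ cs.getD (i + 2 - 1) ' ' = '\'') := ⟨by omega, by simpa using hn2.2⟩
            rw [decide_eq_true hc]
          · -- branch 3: lone quote
            rw [if_pos hq, if_neg hb, if_neg hn2]
            have hh : (cs.drop (i + 1)).head? ≠ some '\'' := by
              by_cases hlt : i + 1 < cs.length
              · have hdrop2 : cs.drop (i + 1) = cs.getD (i + 1) ' ' :: cs.drop (i + 2) := by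
                  rw [List.getD_eq_getElem _ _ hlt, List.drop_eq_getElem_cons hlt]
                rw [hdrop2]
                intro hcon
                exact hn2 ⟨hlt, by simpa using hcon⟩
              · rw [List.drop_eq_nil_of_le (by omega)]; simp
            simp only [gh, hq, if_pos, hb, decide_false, Bool.false_eq_true, if_false, hh,
              if_neg]
            rw [ih (i + 1) (by omega)]
            have hc : (0 < i + 1 ∧ cs.getD (i + 1 - 1) ' ' = '\'') := ⟨Nat.succ_pos _, by simpa using hq⟩
            rw [decide_eq_true hc]
      · -- non-quote character
        rw [if_neg hq]
        simp only [gh, hq, if_neg]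
        rw [ih (i + 1) (by omega)]
        have hc : ¬ (0 < i + 1 ∧ cs.getD (i + 1 - 1) ' ' = '\'') := by
          intro hcon; exact hq (by simpa using hcon.2)
        rw [decide_eq_false hc]
        simp
    · have h' : cs.length ≤ i := by omega
      rw [aLoop, List.drop_eq_nil_of_le h']
      simp [h, gh]

-- the characters contributed by a list of pieces
def J (ls : List String) : List Char := (ls.map String.toList).flatten

lemma J_cons (s : String) (ls : List String) : J (s :: ls) = s.toList ++ J ls := by
  simp [J]

lemma J_append (l1 l2 : List String) : J (l1 ++ l2) = J l1 ++ J l2 := by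
  simp [J]

lemma J_gh_nonquote (c : Char) (hc : c ≠ '\'') (k : Nat) (post : List Char) :
    J (gh false (List.replicate k c ++ post)) = List.replicate k c ++ J (gh false post) := by
  induction k with
  | zero => simp
  | succ k ih =>
    rw [List.replicate_succ, List.cons_append]
    simp only [gh, hc, if_false, if_neg]
    rw [J_cons, ih]
    simp [List.replicate_succ]

lemma gh_true_replicate (m : Nat) (post : List Char) (hpost : post.head? ≠ some '\'') :
    gh true (List.replicate m '\'' ++ post) = List.replicate m "'" ++ gh false post := by
  induction m with
  | zero => simpa using gh_of_head_ne true post hpost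
  | succ m ih =>
    rw [List.replicate_succ, List.cons_append]
    simp only [gh, if_pos, if_true]
    rw [ih, List.replicate_succ, List.cons_append]

lemma J_replicate_quote (m : Nat) :
    J (List.replicate m "'") = List.replicate m '\'' := by
  induction m with
  | zero => simp [J]
  | succ m ih =>
    rw [List.replicate_succ, J_cons, ih, List.replicate_succ]
    rfl

lemma takeWhile_replicate_self (c : Char) (l : List Char) :
    l.takeWhile (· = c) = List.replicate (l.takeWhile (· = c)).length c := by
  induction l with
  | nil => simp
  | cons a l ih =>
    by_cases h : a = c
    · subst h
      rw [List.takeWhile_cons_of_pos (by simp)]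
      simp only [List.length_cons, List.replicate_succ]
      exact congrArg _ ih
    · rw [List.takeWhile_cons_of_neg (by simp [h])]
      simp

lemma dropWhile_head?_ne (c : Char) (l : List Char) :
    (l.dropWhile (· = c)).head? ≠ some c := by
  have h := List.head?_dropWhile_not (· = c) l
  cases hh : (l.dropWhile (· = c)).head? with
  | none => simp
  | some d =>
    rw [hh] at h
    simp only at h
    intro hcon
    have : d = c := by simpa using hcon
    simp [this] at h

lemma J_gh_eq_bRuns (n : Nat) (l : List Char) (hn : l.length ≤ n) :
    J (gh false l) = J ((bRuns l).map bPiece) := by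
  induction n generalizing l with
  | zero =>
    have : l = [] := List.eq_nil_of_length_eq_zero (by omega)
    subst this
    simp [gh, bRuns]
  | succ n ih =>
    cases l with
    | nil => simp [gh, bRuns]
    | cons c rest =>
      have hprerep := takeWhile_replicate_self c rest
      have hsplit : rest = rest.takeWhile (· = c) ++ rest.dropWhile (· = c) :=
        List.takeWhile_append_dropWhile.symm
      have hpostne : (rest.dropWhile (· = c)).head? ≠ some c := dropWhile_head?_ne c rest
      have hlen : (rest.dropWhile (· = c)).length ≤ n := by
        have h1 := List.length_dropWhile_le (· = c) rest
        simp only [List.length_cons] at hn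
        omega
      rw [bRuns]
      simp only [List.map_cons]
      rw [J_cons]
      by_cases hc : c = '\''
      · subst hc
        cases hk : (rest.takeWhile (· = '\'')).length with
        | zero =>
          -- lone quote: the run has length 1
          have hpre0 : rest.takeWhile (· = '\'') = [] := List.eq_nil_of_length_eq_zero hk
          have hrest : rest.dropWhile (· = '\'') = rest := by
            conv_rhs => rw [hsplit]
            rw [hpre0, List.nil_append]
          have hh : rest.head? ≠ some '\'' := by rw [← hrest]; exact hpostne
          simp only [gh, if_pos, hh, if_neg, Bool.false_eq_true, if_false]
          rw [J_cons, gh_of_head_ne true rest hh, ih rest (hrest ▸ hlen), hrest]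
          simp [bPiece, hk]
        | succ m =>
          -- run of length m + 2
          have hrest : rest = '\'' :: (List.replicate m '\'' ++ rest.dropWhile (· = '\'')) := by
            conv_lhs => rw [hsplit]
            rw [hprerep, hk, List.replicate_succ, List.cons_append]
          have hhead : rest.head? = some '\'' := by rw [hrest]; rfl
          simp only [gh, if_pos, hhead, if_true, Bool.false_eq_true, if_false]
          rw [J_cons]
          have htail : rest.tail = List.replicate m '\'' ++ rest.dropWhile (· = '\'') := by
            conv_lhs => rw [hrest]
            rfl
          rw [htail, gh_true_replicate m _ (by simpa using hpostne), J_append,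
            J_replicate_quote, ih _ hlen]
          have hbp : bPiece ('\'', m + 1 + 1) = String.ofList (List.replicate (m + 2) '\'') := by
            simp [bPiece]
          rw [hbp]
          simp [List.replicate_succ]
      · -- a run of non-quote characters
        have hcons : c :: rest =
            List.replicate ((rest.takeWhile (· = c)).length + 1) c ++ rest.dropWhile (· = c) := by
          rw [List.replicate_succ, List.cons_append]
          conv_lhs => rw [hsplit]
          rw [← hprerep]
        rw [hcons, J_gh_nonquote c hc _ _, ih _ hlen]
        have hbp : bPiece (c, (rest.takeWhile (· = c)).length + 1) =
            String.ofList (List.replicate ((rest.takeWhile (· = c)).length + 1) c) := by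
          simp [bPiece, hc]
        rw [hbp]
        simp

-- ===== VERDICT (by name: the statement is the Claim_ definition above) =====
theorem escape_unescaped_quotes_spec : Claim_equal_escape_unescaped_quotes := by
  intro text _
  unfold Spec_escape_unescaped_quotes escape_unescaped_quotes escape_unescaped_quotes_alt
  rw [aLoop_eq_gh text.toList.length text.toList 0 (by omega)]
  simp only [Nat.lt_irrefl, false_and, decide_false, List.drop_zero]
  rw [String.join_eq, String.join_eq]
  exact congrArg String.ofList (J_gh_eq_bRuns text.toList.length text.toList (le_refl _))
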